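/- GENERATED by mk_final_copies.py from the proof of the farm's unit `vorbis_decode_initial.7` (farm:vorbis_decode_initial.7.1: Proof.lean) as the
   re-elaboration sweep compiled it — do not edit. -/
import Asan.CheckWalk
import Vorbis.Spec.Units.vorbis_decode_initial_7

open X86 X86.User Asan Vorbis Vorbis.Spec Vorbis.Spec.vorbis_decode_initial

set_option maxRecDepth 4000
set_option maxHeartbeats 4000000

namespace Vorbis.Spec.vorbis_decode_initial_7

/-- A dword whose `int` reading lies in `[0, 8192]` is at most 8192. -/
theorem le_of_sint32_le (k : Nat) (hk : k < 2 ^ 32) (h0 : 0 ≤ sint32 k) (h1 : sint32 k ≤ 8192) : k ≤ 8192 := by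
  unfold sint32 at h0 h1
  split at h0 <;> omega

/-- HD3 as bounds of the two dwords the code reads: `f->blocksize_0` (`[rdi + 152]`) and `f->blocksize_1` (`[rdi + 156]`). -/
theorem blk_bounds (mem : Mem) (r : Word)
    (h : 64 ≤ stb_vorbis.blocksize_0 mem r.toNat ∧ stb_vorbis.blocksize_0 mem r.toNat ≤ stb_vorbis.blocksize_1 mem r.toNat ∧
      stb_vorbis.blocksize_1 mem r.toNat ≤ 8192) :
    mem.readLE (r + 152) 4 ≤ 8192 ∧ mem.readLE (r + 156) 4 ≤ 8192 := by
  simp only [vacc, voff] at h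
  rw [Mem.i32_def, Mem.i32_def] at h
  unfold Mem.u32 at h
  have e0 : mem.readLE (r + 152) 4 = mem.readLE (addr (r.toNat + 152)) 4 := readLE_field mem r 152 4
  have e1 : mem.readLE (r + 156) 4 = mem.readLE (addr (r.toNat + 156)) 4 := readLE_field mem r 156 4
  rw [← e0, ← e1] at h
  have l0 := X86.User.Mem.readLE_lt mem (r + 152) 4
  have l1 := X86.User.Mem.readLE_lt mem (r + 156) 4
  constructor
  · exact le_of_sint32_le _ (by omega) (by omega) (by omega)
  · exact le_of_sint32_le _ (by omega) (by omega) (by omega)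

/-- **The exit of the segment from its five stores**: `window_center` at `[R − 64, R − 60)`, two return addresses of check calls at
`[R − 96, R − 88)`, `*p_left_start` (rsi) and `*p_left_end` (rdx): `IFrame` is carried (`IFrame.carry`), `*mode` is kept, and the three
dwords read back as stored (the two out-objects are apart: `Top.Apart4`; both lie above the own frame). -/
theorem exit_frame {Blk : Block → Prop} {len : Nat} {u₀ u : State} {ret : Word} {s q : State} {i W X Y r1 r2 : Nat}
    (hfr0 : IFrame Blk len u₀ u ret
      [⟨(u.reg .rsp).toNat - 448, (u.reg .rsp).toNat⟩,
      ⟨(u.reg .rdi).toNat + 48, (u.reg .rdi).toNat + 56⟩, ⟨(u.reg .rdi).toNat + 84, (u.reg .rdi).toNat + 96⟩,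
      ⟨(u.reg .rdi).toNat + 136, (u.reg .rdi).toNat + 144⟩, ⟨(u.reg .rdi).toNat + 1484, (u.reg .rdi).toNat + 1749⟩,
      ⟨(u.reg .rdi).toNat + 1752, (u.reg .rdi).toNat + 1784⟩, ⟨(u.reg .rdi).toNat + 1796, (u.reg .rdi).toNat + 1804⟩,
      ⟨(u.reg .rsi).toNat, (u.reg .rsi).toNat + 4⟩, ⟨(u.reg .rdx).toNat, (u.reg .rdx).toNat + 4⟩,
      ⟨(u.reg .rcx).toNat, (u.reg .rcx).toNat + 4⟩, ⟨(u.reg .r8).toNat, (u.reg .r8).toNat + 4⟩,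
      ⟨(u.reg .r9).toNat, (u.reg .r9).toNat + 4⟩] s)
    (hroom : 7340032 + 448 ≤ (u.reg .rsp).toNat) (htop : (u.reg .rsp).toNat + 8 ≤ 8388608)
    (hf1 : 1154368 ≤ (u.reg .rdi).toNat) (hf2 : (u.reg .rdi).toNat + 1808 ≤ 12582912)
    (hoff : (u.reg .rdi).toNat + 1808 ≤ 7340032 ∨ 8388608 ≤ (u.reg .rdi).toNat)
    (hls : (u.reg .rsp).toNat + 8 ≤ (u.reg .rsi).toNat) (a2 : (u.reg .rsi).toNat + 4 ≤ 8388608)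
    (hle : (u.reg .rsp).toNat + 8 ≤ (u.reg .rdx).toNat) (b2 : (u.reg .rdx).toNat + 4 ≤ 8388608)
    (e1 : 7340032 ≤ (u.reg .r9).toNat) (e2 : (u.reg .r9).toNat + 4 ≤ 8388608)
    (hap12 : (u.reg .rsi).toNat + 4 ≤ (u.reg .rdx).toNat ∨ (u.reg .rdx).toNat + 4 ≤ (u.reg .rsi).toNat)
    (hap15 : (u.reg .rsi).toNat + 4 ≤ (u.reg .r9).toNat ∨ (u.reg .r9).toNat + 4 ≤ (u.reg .rsi).toNat)
    (hap25 : (u.reg .rdx).toNat + 4 ≤ (u.reg .r9).toNat ∨ (u.reg .r9).toNat + 4 ≤ (u.reg .rdx).toNat)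
    (hm9 : (u.reg .rsp).toNat + 8 ≤ (u.reg .r9).toNat)
    (hW : W < 2 ^ 32) (hX : X < 2 ^ 32) (hY : Y < 2 ^ 32)
    (hmem : q.mem = ((((s.mem.writeLE (u.reg .rsp - 64) 4 W).writeLE (u.reg .rsp - 96) 8 r1).writeLE
      (u.reg .rsi) 4 X).writeLE (u.reg .rsp - 96) 8 r2).writeLE (u.reg .rdx) 4 Y)
    (hmode : s.mem.readLE (u.reg .r9) 4 = i)
    (hcode : Mem.EqOn 1048576 1154368 u₀.mem q.mem) (hun : ShadowUntouched u.mem q.mem)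
    (hdf : q.flags .df = false) (hmx : q.mxcsr &&& 8064 = 8064) :
    IFrame Blk len u₀ u ret
      [⟨(u.reg .rsp).toNat - 448, (u.reg .rsp).toNat⟩,
      ⟨(u.reg .rdi).toNat + 48, (u.reg .rdi).toNat + 56⟩, ⟨(u.reg .rdi).toNat + 84, (u.reg .rdi).toNat + 96⟩,
      ⟨(u.reg .rdi).toNat + 136, (u.reg .rdi).toNat + 144⟩, ⟨(u.reg .rdi).toNat + 1484, (u.reg .rdi).toNat + 1749⟩,
      ⟨(u.reg .rdi).toNat + 1752, (u.reg .rdi).toNat + 1784⟩, ⟨(u.reg .rdi).toNat + 1796, (u.reg .rdi).toNat + 1804⟩,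
      ⟨(u.reg .rsi).toNat, (u.reg .rsi).toNat + 4⟩, ⟨(u.reg .rdx).toNat, (u.reg .rdx).toNat + 4⟩,
      ⟨(u.reg .rcx).toNat, (u.reg .rcx).toNat + 4⟩, ⟨(u.reg .r8).toNat, (u.reg .r8).toNat + 4⟩,
      ⟨(u.reg .r9).toNat, (u.reg .r9).toNat + 4⟩] q ∧
    q.mem.readLE (u.reg .r9) 4 = i ∧
    q.mem.readLE (u.reg .rsp - 64) 4 = W ∧
    q.mem.readLE (u.reg .rsi) 4 = X ∧
    q.mem.readLE (u.reg .rdx) 4 = Y := by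
  have hS : Mem.SameExcept [⟨(u.reg .rsp).toNat - 96, (u.reg .rsp).toNat - 88⟩,
      ⟨(u.reg .rsp).toNat - 64, (u.reg .rsp).toNat - 60⟩,
      ⟨(u.reg .rsi).toNat, (u.reg .rsi).toNat + 4⟩, ⟨(u.reg .rdx).toNat, (u.reg .rdx).toNat + 4⟩] s.mem q.mem := by
    rw [hmem]
    u_same
  have hk := di_keep hfr0.bits hS (by
    intro w hw
    simp only [List.mem_cons, List.not_mem_nil, or_false] at hw
    rcases hw with rfl | rfl | rfl | rfl <;> simp only [] <;> omega)
  refine ⟨?_, ?_, ?_, ?_, ?_⟩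
  · refine IFrame.carry hfr0 (by omega) (by omega) hS ?_ ?_ hcode hun hdf hmx hk.1
    · intro w hw
      simp only [List.mem_cons, List.not_mem_nil, or_false] at hw
      rcases hw with rfl | rfl | rfl | rfl
      · exact ⟨_, List.mem_cons_self, by simp only []; omega, by simp only []; omega⟩
      · exact ⟨_, List.mem_cons_self, by simp only []; omega, by simp only []; omega⟩
      · exact ⟨⟨(u.reg .rsi).toNat, (u.reg .rsi).toNat + 4⟩, by simp only [List.mem_cons, true_or, or_true],
          by simp only []; omega, by simp only []; omega⟩
      · exact ⟨⟨(u.reg .rdx).toNat, (u.reg .rdx).toNat + 4⟩, by simp only [List.mem_cons, true_or, or_true],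
          by simp only []; omega, by simp only []; omega⟩
    · intro w hw
      simp only [List.mem_cons, List.not_mem_nil, or_false] at hw
      rcases hw with rfl | rfl | rfl | rfl <;> (simp only []; omega)
  · rw [hS.readLE (u.reg .r9) 4 (by omega) (by
      intro w hw
      simp only [List.mem_cons, List.not_mem_nil, or_false] at hw
      rcases hw with rfl | rfl | rfl | rfl <;> simp only [] <;> omega)]
    exact hmode
  · rw [hmem]
    u_read
  · rw [hmem]
    u_read
  · rw [hmem]
    u_read


end Vorbis.Spec.vorbis_decode_initial_7

/-- Segment 7 of `vorbis_decode_initial` (0x113282–0x1132dd + 0x113317–0x113333, 33 instructions, six check sites, no contract call;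
stb_vorbis_fixed.c 3188–3195): `window_center = n >> 1`, then the left half of the window: `(0, window_center)` when the block is
short or `prev ≠ 0`, else `((n − b0) >> 2, (n + b0) >> 2)`: from `IAtWin` at the join `at_113282` to `IAtRight` at the join
`at_113337`. ONE walk over the three paths; the frame at each exit by `exit_frame`, the `sar` arithmetic by `di_sar`, `di_sub_sar`,
`di_add_sar` (nothing wraps: HD3). -/
theorem Vorbis.Spec.Worked.vorbis_decode_initial_7_ok : Vorbis.Spec.vorbis_decode_initial_7.Statement := by
  intro Lay hLay μ hμ u₀ hcode hstore4 hload4 hload1 others frames len A stored room ysz u ret i bf n s hE hs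
  have he := hE.entry
  have hpre := hE.pre
  v_entry he
  have hsp := hpre.1.rsp
  obtain ⟨hsh, hinv, hpls, hple, hprs, hpre_, hpm, hapart⟩ := hpre
  have hobj := hinv.objLive
  have hwhere := hobj.where_ hsh.inv hsh.offText (by decide)
  simp only [Off.sizeof.stb_vorbis] at hwhere
  have hoff := hinv.objOff
  simp only [Off.sizeof.stb_vorbis] at hoff
  -- HD3 of the entry invariant: both block sizes are at most 8192
  have hblk := Vorbis.Spec.vorbis_decode_initial_7.blk_bounds u.mem (u.reg .rdi) hinv.fb.vorbis.header.HD3.range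
  -- the out-objects this segment stores lie above the own frame; `*mode` too
  have hwls := hpls.1.where_ hsh.inv hsh.offText (by decide)
  have hwle := hple.1.where_ hsh.inv hsh.offText (by decide)
  have hwm := hpm.1.where_ hsh.inv hsh.offText (by decide)
  -- the pairs of `Top.Apart4` the segment needs: (rsi, rdx), (rsi, r9), (rdx, r9)
  have hap12 : Top.RangesApart (u.reg .rsi).toNat 4 (u.reg .rdx).toNat 4 :=
    (List.pairwise_cons.mp hapart).1 _ (by simp only [List.mem_cons, true_or])
  have hap15 : Top.RangesApart (u.reg .rsi).toNat 4 (u.reg .r9).toNat 4 :=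
    (List.pairwise_cons.mp hapart).1 _ (by simp only [List.mem_cons, true_or, or_true])
  have hap25 : Top.RangesApart (u.reg .rdx).toNat 4 (u.reg .r9).toNat 4 :=
    (List.pairwise_cons.mp (List.pairwise_cons.mp hapart).2).1 _ (by simp only [List.mem_cons, true_or, or_true])
  unfold Top.RangesApart at hap12 hap15 hap25
  obtain ⟨hlls, a1, a2⟩ := hpls
  obtain ⟨hlle, b1, b2⟩ := hple
  obtain ⟨_, c1, c2⟩ := hprs
  obtain ⟨_, d1, d2⟩ := hpre_
  obtain ⟨_, e1, e2⟩ := hpm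
  have hls : (u.reg .rsp).toNat + 8 ≤ (u.reg .rsi).toNat := by omega
  have hle : (u.reg .rsp).toNat + 8 ≤ (u.reg .rdx).toNat := by omega
  have hm9 : (u.reg .rsp).toNat + 8 ≤ (u.reg .r9).toNat := by omega
  clear hapart hinv hwls hwle hwm
  obtain ⟨w_rip, w_rsp, w_rbx, w_r12, w_r13, w_r14, w_r15, hilt, hmode, hflag, hnshort, hnlong, w_kept, hfr0⟩ := hs
  have w_eq := hfr0.code
  have hsame := hfr0.same
  have hun := hfr0.un
  have hbits := hfr0.bits
  have hdf := hfr0.df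
  have hmx := hfr0.mx
  -- ebp (`prev`) is not in the assertion: any value
  obtain ⟨z, w_rbp⟩ : ∃ z, s.reg .rbp = z := ⟨_, rfl⟩
  have hm64 : (addr ((u.reg .rdi).toNat + 484 + 6 * i)).toNat = (u.reg .rdi).toNat + 484 + 6 * i := toNat_addr _ (by omega)
  have a152 : (u.reg .rdi + 152).toNat = (u.reg .rdi).toNat + 152 := toNat_add_ofNat (u.reg .rdi) 152 (by omega)
  -- the two fields the segment reads, in the present memory as in the entry memory: they are off the footprint
  have eflag : s.mem.readLE (addr ((u.reg .rdi).toNat + 484 + 6 * i)) 1 =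
      u.mem.readLE (addr ((u.reg .rdi).toNat + 484 + 6 * i)) 1 :=
    hsame.readLE _ 1 (by omega) (by
      intro w hw
      simp only [List.mem_cons, List.not_mem_nil, or_false] at hw
      rcases hw with rfl | rfl | rfl | rfl | rfl | rfl | rfl | rfl | rfl | rfl | rfl | rfl <;> simp only [] <;> omega)
  have eb0 : s.mem.readLE (u.reg .rdi + 152) 4 = u.mem.readLE (u.reg .rdi + 152) 4 :=
    hsame.readLE _ 4 (by omega) (by
      intro w hw
      simp only [List.mem_cons, List.not_mem_nil, or_false] at hw
      rcases hw with rfl | rfl | rfl | rfl | rfl | rfl | rfl | rfl | rfl | rfl | rfl | rfl <;> simp only [] <;> omega)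
  have hflt := X86.User.Mem.readLE_lt s.mem (addr ((u.reg .rdi).toNat + 484 + 6 * i)) 1
  -- `n` is a dword; on a long block it is `blocksize_1 ≤ 8192`
  have hn32 : n < 2 ^ 32 := by
    by_cases hb : bf = 0
    · rw [hnshort hb]
      omega
    · rw [hnlong hb]
      omega
  have e21 : (2 : Int) ^ 1 = 2 := by decide
  have e22 : (2 : Int) ^ 2 = 4 := by decide
  u_walk hcode [hμ.vendor] until [Vorbis.L.vorbis_decode_initial.at_113337] span [Vorbis.L.textLo, Vorbis.L.textHi] side (v_side)
  case check_11328e =>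
    -- 0x11328e, line 3189: the byte `m->blockflag`, inside `*f`
    have hun' : ShadowUntouched u.mem s_11328e.mem := by v_untouched
    exact hobj.accSmall hsh.inv hun' _ 1 (by decide) (by rw [hm64]; omega)
      (by rw [hm64]; simp only [Vorbis.Off.sizeof.stb_vorbis]; omega)
  case check_11331a =>
    -- 0x11331a, line 3193 (short block): `*p_left_start`
    have hun' : ShadowUntouched u.mem s_11331a.mem := by v_untouched
    exact hlls.accSmall hsh.inv hun' _ 4 (by decide) (by u_omega) (by u_omega)
  case check_11332a =>
    -- 0x11332a, line 3194 (short block): `*p_left_end`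
    have hun' : ShadowUntouched u.mem s_11332a.mem := by v_untouched
    exact hlle.accSmall hsh.inv hun' _ 4 (by decide) (by u_omega) (by u_omega)
  case check_11331a =>
    -- 0x11331a, line 3193 (long block, `prev ≠ 0`): `*p_left_start`
    have hun' : ShadowUntouched u.mem s_11331a.mem := by v_untouched
    exact hlls.accSmall hsh.inv hun' _ 4 (by decide) (by u_omega) (by u_omega)
  case check_11332a =>
    -- 0x11332a, line 3194 (long block, `prev ≠ 0`): `*p_left_end`
    have hun' : ShadowUntouched u.mem s_11332a.mem := by v_untouched
    exact hlle.accSmall hsh.inv hun' _ 4 (by decide) (by u_omega) (by u_omega)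
  case check_1132a4 =>
    -- 0x1132a4, line 3190: `f->blocksize_0`
    have hun' : ShadowUntouched u.mem s_1132a4.mem := by v_untouched
    refine hobj.accSmall hsh.inv hun' _ 4 (by decide) (by u_omega) ?_
    simp only [Vorbis.Off.sizeof.stb_vorbis]
    u_omega
  case check_1132ba =>
    -- 0x1132ba, line 3190: `*p_left_start`
    have hun' : ShadowUntouched u.mem s_1132ba.mem := by v_untouched
    exact hlls.accSmall hsh.inv hun' _ 4 (by decide) (by u_omega) (by u_omega)
  case check_1132d4 =>
    -- 0x1132d4, line 3191: `*p_left_end`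
    have hun' : ShadowUntouched u.mem s_1132d4.mem := by v_untouched
    exact hlle.accSmall hsh.inv hun' _ 4 (by decide) (by u_omega) (by u_omega)
  · -- 0x113337 from 0x113333, the short block: `(*p_left_start, *p_left_end) = (0, window_center)`
    have hunq : ShadowUntouched u.mem s_113333.mem := by v_untouched
    have hW : ((BitVec.ofNat 32 n).sshiftRight 1).toNat < 2 ^ 32 := BitVec.isLt _
    have hdfq : s_113333.flags .df = false := by
      rw [w_flags]
      exact w_df_11332a
    have hmxq : s_113333.mxcsr &&& 8064 = 8064 := by
      rw [w_mxcsr]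
      exact hmx
    obtain ⟨hfrq, hmodeq, hwcq, hlsq, hleq⟩ := Vorbis.Spec.vorbis_decode_initial_7.exit_frame hfr0 he_room he_top
      hwhere.1 hwhere.2.1 hoff hls a2 hle b2 e1 e2 hap12 hap15 hap25 hm9 hW (by decide) (BitVec.isLt _) w_mem hmode w_eq hunq
      hdfq hmxq
    have hwc : sint32 (s_113333.mem.readLE (u.reg .rsp - 64) 4) = sint32 n / 2 := by
      rw [hwcq, di_sar n 1 hn32, e21]
    refine ReachVia.done ⟨w_rip, w_rsp, w_rbx, w_r14, w_r15, hilt, hmodeq, hflag, hnshort, hnlong, hwc, Or.inl ⟨?_, ?_⟩,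
      w_kept.mono_all (by rfl), hfrq⟩
    · rw [hlsq]
      decide
    · rw [hleq, BitVec.toNat_ofNat, Nat.mod_eq_of_lt (by omega), Nat.mod_eq_of_lt hW, di_sar n 1 hn32, e21]
  · -- 0x113337 from 0x113333, the long block with `prev ≠ 0`: `(0, window_center)`
    have hunq : ShadowUntouched u.mem s_113333.mem := by v_untouched
    have hW : ((BitVec.ofNat 32 n).sshiftRight 1).toNat < 2 ^ 32 := BitVec.isLt _
    have hdfq : s_113333.flags .df = false := by
      rw [w_flags]
      exact w_df_11332a
    have hmxq : s_113333.mxcsr &&& 8064 = 8064 := by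
      rw [w_mxcsr]
      exact hmx
    obtain ⟨hfrq, hmodeq, hwcq, hlsq, hleq⟩ := Vorbis.Spec.vorbis_decode_initial_7.exit_frame hfr0 he_room he_top
      hwhere.1 hwhere.2.1 hoff hls a2 hle b2 e1 e2 hap12 hap15 hap25 hm9 hW (by decide) (BitVec.isLt _) w_mem hmode w_eq hunq
      hdfq hmxq
    have hwc : sint32 (s_113333.mem.readLE (u.reg .rsp - 64) 4) = sint32 n / 2 := by
      rw [hwcq, di_sar n 1 hn32, e21]
    refine ReachVia.done ⟨w_rip, w_rsp, w_rbx, w_r14, w_r15, hilt, hmodeq, hflag, hnshort, hnlong, hwc, Or.inl ⟨?_, ?_⟩,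
      w_kept.mono_all (by rfl), hfrq⟩
    · rw [hlsq]
      decide
    · rw [hleq, BitVec.toNat_ofNat, Nat.mod_eq_of_lt (by omega), Nat.mod_eq_of_lt hW, di_sar n 1 hn32, e21]
  · -- 0x113337 from 0x1132dd, the long block with `prev = 0`: `((n − b0) >> 2, (n + b0) >> 2)`
    have hbf : bf ≠ 0 := by
      intro h0
      apply hbr_113297
      rw [hflag, h0]
    have hn : n ≤ 8192 := by
      rw [hnlong hbf]
      exact hblk.2
    have hunq : ShadowUntouched u.mem s_1132dd.mem := by v_untouched
    have hW : ((BitVec.ofNat 32 n).sshiftRight 1).toNat < 2 ^ 32 := BitVec.isLt _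
    have hdfq : s_1132dd.flags .df = false := by
      rw [w_flags]
      exact w_df_1132d4
    have hmxq : s_1132dd.mxcsr &&& 8064 = 8064 := by
      rw [w_mxcsr]
      exact hmx
    obtain ⟨hfrq, hmodeq, hwcq, hlsq, hleq⟩ := Vorbis.Spec.vorbis_decode_initial_7.exit_frame hfr0 he_room he_top
      hwhere.1 hwhere.2.1 hoff hls a2 hle b2 e1 e2 hap12 hap15 hap25 hm9 hW (BitVec.isLt _) (BitVec.isLt _) w_mem hmode w_eq hunq
      hdfq hmxq
    have hwc : sint32 (s_1132dd.mem.readLE (u.reg .rsp - 64) 4) = sint32 n / 2 := by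
      rw [hwcq, di_sar n 1 hn32, e21]
    refine ReachVia.done ⟨w_rip, w_rsp, w_rbx, w_r14, w_r15, hilt, hmodeq, hflag, hnshort, hnlong, hwc, Or.inr ⟨hbf, ?_, ?_⟩,
      w_kept.mono_all (by rfl), hfrq⟩
    · rw [hlsq, di_sub_sar n _ 2 (by omega) (by omega), e22]
    · rw [hleq, di_add_sar n _ 2 (by omega) (by omega), e22]
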